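-- pv_equiv track=rewrite | github.com/Recursive-Emergence/re_archeology | backend/api/routers/discovery.py | generate_progressive_tile_order
-- ===== SOURCE A (Python) =====
-- def generate_progressive_tile_order(tiles_x, tiles_y, pattern='left_to_right'):
--     """
--     Generate tile coordinates in progressive order patterns
--     """
--     tiles = []
--
--     if pattern == 'left_to_right':
--         # Process column by column from left to right (wipe effect)
--         for col in range(tiles_x):
--             for row in range(tiles_y):
--                 tiles.append((row, col))
--
--     elif pattern == 'top_to_bottom':
--         # Process row by row from top to bottom
--         for row in range(tiles_y):
--             for col in range(tiles_x):
--                 tiles.append((row, col))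
--
--     elif pattern == 'center_outward':
--         # Process from center outward in a spiral
--         center_row, center_col = tiles_y // 2, tiles_x // 2
--         visited = set()
--
--         # Start with center tile
--         tiles.append((center_row, center_col))
--         visited.add((center_row, center_col))
--
--         # Expand outward in layers
--         for radius in range(1, max(tiles_x, tiles_y)):
--             for dr in range(-radius, radius + 1):
--                 for dc in range(-radius, radius + 1):
--                     if abs(dr) == radius or abs(dc) == radius:  # Only edge of current radius
--                         r, c = center_row + dr, center_col + dc
--                         if 0 <= r < tiles_y and 0 <= c < tiles_x and (r, c) not in visited:
--                             tiles.append((r, c))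
--                             visited.add((r, c))
--     else:
--         # Default: simple sequential
--         for row in range(tiles_y):
--             for col in range(tiles_x):
--                 tiles.append((row, col))
--
--     return tiles
-- ===== SOURCE B (Python) =====
-- def generate_progressive_tile_order(tiles_x, tiles_y, pattern='left_to_right'):
--     """Generate tile coordinates in progressive order patterns."""
--     if pattern == 'left_to_right':
--         # column-major wipe
--         return [(row, col) for col in range(tiles_x) for row in range(tiles_y)]
--
--     if pattern == 'center_outward':
--         # Center-outward layers: walk only the perimeter cells of each
--         # Chebyshev-radius ring, in the same row-major order per ring.
--         cr, cc = tiles_y // 2, tiles_x // 2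
--         tiles = []
--         if 0 <= cr < tiles_y and 0 <= cc < tiles_x:
--             tiles.append((cr, cc))
--         for radius in range(1, max(tiles_x, tiles_y)):
--             lo_r = max(cr - radius, 0)
--             hi_r = min(cr + radius, tiles_y - 1)
--             for r in range(lo_r, hi_r + 1):
--                 if r == cr - radius or r == cr + radius:
--                     # full edge row of the ring
--                     for c in range(max(cc - radius, 0), min(cc + radius, tiles_x - 1) + 1):
--                         tiles.append((r, c))
--                 else:
--                     # only the two side cells of the ring
--                     if cc - radius >= 0:
--                         tiles.append((r, cc - radius))
--                     if cc + radius < tiles_x: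
--                         tiles.append((r, cc + radius))
--         return tiles
--
--     # 'top_to_bottom' and the default are the same row-major order
--     return [(row, col) for row in range(tiles_y) for col in range(tiles_x)]
-- ===== Notes on version B (the rewrite author's own statement) =====
-- stated objective: alternative
-- what changed: center_outward now enumerates only the perimeter cells of each Chebyshev ring (clipped to the grid) instead of scanning the full (2r+1)^2 square with a visited-set per radius, and top_to_bottom/default share one row-major comprehension
-- intended difference: For pattern 'center_outward' with tiles_x <= 0 or tiles_y <= 0 (an empty grid), A unconditionally returns the out-of-bounds pseudo-center [(tiles_y//2, tiles_x//2)] while B returns the empty list, which is the intended result for an empty grid. — e.g. on generate_progressive_tile_order(0, 0, "center_outward"): A returns [[0, 0]], B returns []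
import Mathlib
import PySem

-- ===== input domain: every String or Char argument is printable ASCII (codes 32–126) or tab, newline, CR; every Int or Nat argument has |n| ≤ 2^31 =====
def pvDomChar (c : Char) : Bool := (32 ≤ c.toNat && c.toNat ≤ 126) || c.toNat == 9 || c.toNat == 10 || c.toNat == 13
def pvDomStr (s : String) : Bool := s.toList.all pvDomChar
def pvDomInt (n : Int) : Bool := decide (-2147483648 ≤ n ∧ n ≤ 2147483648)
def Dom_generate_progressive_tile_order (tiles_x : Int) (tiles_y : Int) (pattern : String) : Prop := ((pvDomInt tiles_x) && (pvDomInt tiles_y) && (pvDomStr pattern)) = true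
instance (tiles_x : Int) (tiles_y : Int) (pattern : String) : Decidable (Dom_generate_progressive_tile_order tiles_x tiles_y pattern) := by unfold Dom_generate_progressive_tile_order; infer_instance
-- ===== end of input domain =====

-- B enumerates only the clipped perimeter of each Chebyshev ring for 'center_outward',
-- instead of A's full-square scan with a visited set per radius (a different algorithm).

-- ===== PORT A =====
def generate_progressive_tile_order (tiles_x : Int) (tiles_y : Int) (pattern : String) : List (List Int) :=
  if pattern = "left_to_right" then
    (PySem.List.pyRange 0 tiles_x 1).foldl (fun tiles col =>
      (PySem.List.pyRange 0 tiles_y 1).foldl (fun tiles row => tiles ++ [[row, col]]) tiles) []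
  else if pattern = "top_to_bottom" then
    (PySem.List.pyRange 0 tiles_y 1).foldl (fun tiles row =>
      (PySem.List.pyRange 0 tiles_x 1).foldl (fun tiles col => tiles ++ [[row, col]]) tiles) []
  else if pattern = "center_outward" then
    let center_row : Int := PySem.Int.floordiv tiles_y 2
    let center_col : Int := PySem.Int.floordiv tiles_x 2
    let st0 : List (List Int) × PySem.Set (Int × Int) :=
      ([[center_row, center_col]], PySem.Set.add PySem.Set.empty (center_row, center_col))
    let st := (PySem.List.pyRange 1 (max tiles_x tiles_y) 1).foldl (fun st radius =>
      (PySem.List.pyRange (-radius) (radius + 1) 1).foldl (fun st dr =>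
        (PySem.List.pyRange (-radius) (radius + 1) 1).foldl (fun st dc =>
          if |dr| = radius ∨ |dc| = radius then
            if 0 ≤ center_row + dr ∧ center_row + dr < tiles_y ∧
               0 ≤ center_col + dc ∧ center_col + dc < tiles_x ∧
               (center_row + dr, center_col + dc) ∉ st.2 then
              (st.1 ++ [[center_row + dr, center_col + dc]],
               PySem.Set.add st.2 (center_row + dr, center_col + dc))
            else st
          else st) st) st) st0
    st.1
  else
    (PySem.List.pyRange 0 tiles_y 1).foldl (fun tiles row =>
      (PySem.List.pyRange 0 tiles_x 1).foldl (fun tiles col => tiles ++ [[row, col]]) tiles) []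

-- ===== PORT B =====
def generate_progressive_tile_order_alt (tiles_x : Int) (tiles_y : Int) (pattern : String) : List (List Int) :=
  if pattern = "left_to_right" then
    (PySem.List.pyRange 0 tiles_x 1).flatMap (fun col =>
      (PySem.List.pyRange 0 tiles_y 1).map (fun row => [row, col]))
  else if pattern = "center_outward" then
    let cr : Int := PySem.Int.floordiv tiles_y 2
    let cc : Int := PySem.Int.floordiv tiles_x 2
    let init : List (List Int) :=
      if 0 ≤ cr ∧ cr < tiles_y ∧ 0 ≤ cc ∧ cc < tiles_x then [[cr, cc]] else []
    (PySem.List.pyRange 1 (max tiles_x tiles_y) 1).foldl (fun tiles radius =>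
      (PySem.List.pyRange (max (cr - radius) 0) (min (cr + radius) (tiles_y - 1) + 1) 1).foldl
        (fun tiles r =>
          if r = cr - radius ∨ r = cr + radius then
            tiles ++ (PySem.List.pyRange (max (cc - radius) 0) (min (cc + radius) (tiles_x - 1) + 1) 1).map
              (fun c => [r, c])
          else
            tiles ++ (if 0 ≤ cc - radius then [[r, cc - radius]] else [])
                  ++ (if cc + radius < tiles_x then [[r, cc + radius]] else []))
        tiles) init
  else
    (PySem.List.pyRange 0 tiles_y 1).flatMap (fun row =>
      (PySem.List.pyRange 0 tiles_x 1).map (fun col => [row, col]))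

-- ===== PRECONDITION & SPEC =====
-- For pattern 'center_outward' with tiles_x ≤ 0 or tiles_y ≤ 0 (an empty grid), A unconditionally
-- returns the out-of-bounds pseudo-center [[tiles_y//2, tiles_x//2]] while B returns the empty
-- list, which is the intended result for an empty grid.
def D_generate_progressive_tile_order (tiles_x : Int) (tiles_y : Int) (pattern : String) : Prop :=
  pattern = "center_outward" ∧ (tiles_x ≤ 0 ∨ tiles_y ≤ 0)
instance (tiles_x : Int) (tiles_y : Int) (pattern : String) : Decidable (D_generate_progressive_tile_order tiles_x tiles_y pattern) := by unfold D_generate_progressive_tile_order; infer_instance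

def Spec_generate_progressive_tile_order (tiles_x : Int) (tiles_y : Int) (pattern : String) (out : List (List Int)) : Prop := ¬ D_generate_progressive_tile_order tiles_x tiles_y pattern → out = generate_progressive_tile_order_alt tiles_x tiles_y pattern
instance (tiles_x : Int) (tiles_y : Int) (pattern : String) (out : List (List Int)) : Decidable (Spec_generate_progressive_tile_order tiles_x tiles_y pattern out) := by unfold Spec_generate_progressive_tile_order; infer_instance

def pvDiffWitness_generate_progressive_tile_order : Int × Int × String := (0, 0, "center_outward")
def pvDiffWitnessOut_generate_progressive_tile_order : (List (List Int)) × (List (List Int)) := ([[0, 0]], [])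

-- ===== CLAIM (what is proved, stated in full; the proofs are below) =====
def Claim_unchanged_generate_progressive_tile_order : Prop := ∀ (tiles_x : Int) (tiles_y : Int) (pattern : String), Dom_generate_progressive_tile_order tiles_x tiles_y pattern → Spec_generate_progressive_tile_order tiles_x tiles_y pattern (generate_progressive_tile_order tiles_x tiles_y pattern)
def Claim_changed_generate_progressive_tile_order : Prop := Dom_generate_progressive_tile_order (pvDiffWitness_generate_progressive_tile_order.1) (pvDiffWitness_generate_progressive_tile_order.2.1) (pvDiffWitness_generate_progressive_tile_order.2.2) ∧ D_generate_progressive_tile_order (pvDiffWitness_generate_progressive_tile_order.1) (pvDiffWitness_generate_progressive_tile_order.2.1) (pvDiffWitness_generate_progressive_tile_order.2.2) ∧ generate_progressive_tile_order (pvDiffWitness_generate_progressive_tile_order.1) (pvDiffWitness_generate_progressive_tile_order.2.1) (pvDiffWitness_generate_progressive_tile_order.2.2) = pvDiffWitnessOut_generate_progressive_tile_order.1 ∧ generate_progressive_tile_order_alt (pvDiffWitness_generate_progressive_tile_order.1) (pvDiffWitness_generate_progressive_tile_order.2.1) (pvDiffWitness_generate_progressive_tile_order.2.2) = pvDiffWitnessOut_generate_progressive_tile_order.2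 ∧ pvDiffWitnessOut_generate_progressive_tile_order.1 ≠ pvDiffWitnessOut_generate_progressive_tile_order.2
def Claim_exact_generate_progressive_tile_order : Prop := ∀ (tiles_x : Int) (tiles_y : Int) (pattern : String), Dom_generate_progressive_tile_order tiles_x tiles_y pattern → D_generate_progressive_tile_order tiles_x tiles_y pattern → generate_progressive_tile_order tiles_x tiles_y pattern ≠ generate_progressive_tile_order_alt tiles_x tiles_y pattern

-- ===== LEMMAS AND PROOFS =====

-- one cell of A's radius-ρ ring scan, as a pure list
def cellA (tiles_x tiles_y cr cc ρ dr dc : Int) : List (List Int) :=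
  if (|dr| = ρ ∨ |dc| = ρ) ∧ 0 ≤ cr + dr ∧ cr + dr < tiles_y ∧ 0 ≤ cc + dc ∧ cc + dc < tiles_x
  then [[cr + dr, cc + dc]] else []

def rowA (tiles_x tiles_y cr cc ρ dr : Int) : List (List Int) :=
  (PySem.List.pyRange (-ρ) (ρ + 1) 1).flatMap (cellA tiles_x tiles_y cr cc ρ dr)

def ringA (tiles_x tiles_y cr cc ρ : Int) : List (List Int) :=
  (PySem.List.pyRange (-ρ) (ρ + 1) 1).flatMap (rowA tiles_x tiles_y cr cc ρ)

-- B's per-row and per-ring contributions, as pure lists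
def rowB (tiles_x cr cc ρ r : Int) : List (List Int) :=
  if r = cr - ρ ∨ r = cr + ρ then
    (PySem.List.pyRange (max (cc - ρ) 0) (min (cc + ρ) (tiles_x - 1) + 1) 1).map (fun c => [r, c])
  else
    (if 0 ≤ cc - ρ then [[r, cc - ρ]] else []) ++ (if cc + ρ < tiles_x then [[r, cc + ρ]] else [])

def ringB (tiles_x tiles_y cr cc ρ : Int) : List (List Int) :=
  (PySem.List.pyRange (max (cr - ρ) 0) (min (cr + ρ) (tiles_y - 1) + 1) 1).flatMap
    (rowB tiles_x cr cc ρ)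

-- a fold whose body never changes the accumulator is the accumulator
theorem pv_foldl_id {α β : Type} (f : α → β → α) (l : List β) (st : α)
    (h : ∀ st' x, x ∈ l → f st' x = st') : l.foldl f st = st := by
  induction l generalizing st with
  | nil => rfl
  | cons x xs ih =>
      simp only [List.foldl_cons, h st x (by simp)]
      exact ih st (fun st' y hy => h st' y (by simp [hy]))

-- shift the index of a flatMap over an integer range
theorem pv_flatMap_shift_aux (k : Int) (f g : Int → List (List Int)) :
    ∀ N : Nat, ∀ s e : Int, e - s ≤ N → (∀ r, s ≤ r → r < e → g r = f (r - k)) →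
    (PySem.List.pyRange s e 1).flatMap g
      = (PySem.List.pyRange (s - k) (e - k) 1).flatMap f := by
  intro N
  induction N with
  | zero =>
      intro s e hN _
      rw [PySem.List.pyRange_one_eq_nil (by omega), PySem.List.pyRange_one_eq_nil (by omega)]
      rfl
  | succ n ih =>
      intro s e hN h
      by_cases hse : e ≤ s
      · rw [PySem.List.pyRange_one_eq_nil hse, PySem.List.pyRange_one_eq_nil (by omega)]
        rfl
      · rw [PySem.List.pyRange_one_cons (by omega), PySem.List.pyRange_one_cons (by omega : s - k < e - k)]
        simp only [List.flatMap_cons]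
        rw [h s le_rfl (by omega),
            ih (s + 1) e (by omega) (fun r h1 h2 => h r (by omega) h2)]
        have : s - k + 1 = s + 1 - k := by ring
        rw [this]

theorem pv_flatMap_shift {s e k : Int} (f g : Int → List (List Int))
    (h : ∀ r, s ≤ r → r < e → g r = f (r - k)) :
    (PySem.List.pyRange s e 1).flatMap g
      = (PySem.List.pyRange (s - k) (e - k) 1).flatMap f :=
  pv_flatMap_shift_aux k f g (e - s).toNat s e (by omega) h

-- A's innermost (dc) loop over one row of the radius-ρ ring, characterised
theorem pv_dcfold (tiles_x tiles_y cr cc ρ dr : Int) :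
    ∀ N : Nat, ∀ s e : Int, e - s ≤ N →
    ∀ st : List (List Int) × PySem.Set (Int × Int),
    (∀ dc, s ≤ dc → dc < e → (|dr| = ρ ∨ |dc| = ρ) → (cr + dr, cc + dc) ∉ st.2) →
    ((PySem.List.pyRange s e 1).foldl (fun st dc =>
        if |dr| = ρ ∨ |dc| = ρ then
          if 0 ≤ cr + dr ∧ cr + dr < tiles_y ∧ 0 ≤ cc + dc ∧ cc + dc < tiles_x ∧
             (cr + dr, cc + dc) ∉ st.2 then
            (st.1 ++ [[cr + dr, cc + dc]], PySem.Set.add st.2 (cr + dr, cc + dc))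
          else st
        else st) st).1
      = st.1 ++ (PySem.List.pyRange s e 1).flatMap (cellA tiles_x tiles_y cr cc ρ dr)
    ∧ ∀ p ∈ ((PySem.List.pyRange s e 1).foldl (fun st dc =>
        if |dr| = ρ ∨ |dc| = ρ then
          if 0 ≤ cr + dr ∧ cr + dr < tiles_y ∧ 0 ≤ cc + dc ∧ cc + dc < tiles_x ∧
             (cr + dr, cc + dc) ∉ st.2 then
            (st.1 ++ [[cr + dr, cc + dc]], PySem.Set.add st.2 (cr + dr, cc + dc))
          else st
        else st) st).2,
        p ∈ st.2 ∨ (p.1 = cr + dr ∧ s ≤ p.2 - cc ∧ p.2 - cc < e) := by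
  intro N
  induction N with
  | zero =>
      intro s e hN st hvis
      rw [PySem.List.pyRange_one_eq_nil (by omega)]
      exact ⟨by simp, fun p hp => Or.inl hp⟩
  | succ n ih =>
      intro s e hN st hvis
      by_cases hse : e ≤ s
      · rw [PySem.List.pyRange_one_eq_nil hse]
        exact ⟨by simp, fun p hp => Or.inl hp⟩
      · rw [PySem.List.pyRange_one_cons (by omega)]
        simp only [List.foldl_cons, List.flatMap_cons]
        by_cases hedge : |dr| = ρ ∨ |s| = ρ
        · rw [if_pos hedge]
          by_cases hb : 0 ≤ cr + dr ∧ cr + dr < tiles_y ∧ 0 ≤ cc + s ∧ cc + s < tiles_x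
          · have hnotin : (cr + dr, cc + s) ∉ st.2 := hvis s le_rfl (by omega) hedge
            rw [if_pos ⟨hb.1, hb.2.1, hb.2.2.1, hb.2.2.2, hnotin⟩]
            have hvis' : ∀ dc, s + 1 ≤ dc → dc < e → (|dr| = ρ ∨ |dc| = ρ) →
                (cr + dr, cc + dc) ∉ (PySem.Set.add st.2 (cr + dr, cc + s)) := by
              intro dc h1 h2 h3 hmem
              rw [PySem.Set.mem_add] at hmem
              rcases hmem with hmem | hmem
              · exact hvis dc (by omega) h2 h3 hmem
              · have : cc + dc = cc + s := congrArg Prod.snd hmem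
                omega
            obtain ⟨ih1, ih2⟩ := ih (s + 1) e (by omega)
              ((st.1 ++ [[cr + dr, cc + s]], PySem.Set.add st.2 (cr + dr, cc + s))) hvis'
            refine ⟨?_, ?_⟩
            · rw [ih1]
              simp [cellA, hedge, hb, List.append_assoc]
            · intro p hp
              rcases ih2 p hp with hp2 | hp2
              · rw [PySem.Set.mem_add] at hp2
                rcases hp2 with hp2 | hp2
                · exact Or.inl hp2
                · subst hp2
                  exact Or.inr ⟨rfl, by change s ≤ cc + s - cc; omega, by change cc + s - cc < e; omega⟩
              · exact Or.inr ⟨hp2.1, by omega, hp2.2.2⟩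
          · rw [if_neg (by rintro ⟨h1, h2, h3, h4, _⟩; exact hb ⟨h1, h2, h3, h4⟩)]
            obtain ⟨ih1, ih2⟩ := ih (s + 1) e (by omega) st
              (fun dc h1 h2 h3 => hvis dc (by omega) h2 h3)
            refine ⟨?_, ?_⟩
            · rw [ih1]
              have : cellA tiles_x tiles_y cr cc ρ dr s = [] := by
                unfold cellA
                rw [if_neg (by rintro ⟨_, h1, h2, h3, h4⟩; exact hb ⟨h1, h2, h3, h4⟩)]
              rw [this, List.nil_append]
            · intro p hp
              rcases ih2 p hp with hp2 | hp2
              · exact Or.inl hp2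
              · exact Or.inr ⟨hp2.1, by omega, hp2.2.2⟩
        · rw [if_neg hedge]
          obtain ⟨ih1, ih2⟩ := ih (s + 1) e (by omega) st
            (fun dc h1 h2 h3 => hvis dc (by omega) h2 h3)
          refine ⟨?_, ?_⟩
          · rw [ih1]
            have : cellA tiles_x tiles_y cr cc ρ dr s = [] := by
              unfold cellA
              rw [if_neg (by rintro ⟨h1, _⟩; exact hedge h1)]
            rw [this, List.nil_append]
          · intro p hp
            rcases ih2 p hp with hp2 | hp2
            · exact Or.inl hp2
            · exact Or.inr ⟨hp2.1, by omega, hp2.2.2⟩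

-- A's middle (dr) loop over one radius-ρ ring, characterised
theorem pv_drfold (tiles_x tiles_y cr cc ρ : Int) (hρ : 0 ≤ ρ) :
    ∀ N : Nat, ∀ s e : Int, e - s ≤ N → -ρ ≤ s → e ≤ ρ + 1 →
    ∀ st : List (List Int) × PySem.Set (Int × Int),
    (∀ p ∈ st.2, (-ρ < p.1 - cr ∧ p.1 - cr < ρ ∧ -ρ < p.2 - cc ∧ p.2 - cc < ρ) ∨
      (p.1 - cr < s ∧ -ρ ≤ p.1 - cr ∧ p.1 - cr ≤ ρ ∧ -ρ ≤ p.2 - cc ∧ p.2 - cc ≤ ρ)) →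
    ((PySem.List.pyRange s e 1).foldl (fun st dr =>
        (PySem.List.pyRange (-ρ) (ρ + 1) 1).foldl (fun st dc =>
          if |dr| = ρ ∨ |dc| = ρ then
            if 0 ≤ cr + dr ∧ cr + dr < tiles_y ∧ 0 ≤ cc + dc ∧ cc + dc < tiles_x ∧
               (cr + dr, cc + dc) ∉ st.2 then
              (st.1 ++ [[cr + dr, cc + dc]], PySem.Set.add st.2 (cr + dr, cc + dc))
            else st
          else st) st) st).1
      = st.1 ++ (PySem.List.pyRange s e 1).flatMap (rowA tiles_x tiles_y cr cc ρ)
    ∧ ∀ p ∈ ((PySem.List.pyRange s e 1).foldl (fun st dr =>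
        (PySem.List.pyRange (-ρ) (ρ + 1) 1).foldl (fun st dc =>
          if |dr| = ρ ∨ |dc| = ρ then
            if 0 ≤ cr + dr ∧ cr + dr < tiles_y ∧ 0 ≤ cc + dc ∧ cc + dc < tiles_x ∧
               (cr + dr, cc + dc) ∉ st.2 then
              (st.1 ++ [[cr + dr, cc + dc]], PySem.Set.add st.2 (cr + dr, cc + dc))
            else st
          else st) st) st).2,
        p ∈ st.2 ∨ (s ≤ p.1 - cr ∧ p.1 - cr < e ∧ -ρ ≤ p.2 - cc ∧ p.2 - cc ≤ ρ) := by
  intro N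
  induction N with
  | zero =>
      intro s e hN _ _ st _
      rw [PySem.List.pyRange_one_eq_nil (show e ≤ s by omega)]
      exact ⟨by simp, fun p hp => Or.inl hp⟩
  | succ n ih =>
      intro s e hN hs he st hvis
      by_cases hse : e ≤ s
      · rw [PySem.List.pyRange_one_eq_nil (show e ≤ s from hse)]
        exact ⟨by simp, fun p hp => Or.inl hp⟩
      · rw [PySem.List.pyRange_one_cons (show s < e by omega)]
        simp only [List.foldl_cons, List.flatMap_cons]
        -- the head row dr = s, via pv_dcfold
        have hvis_dc : ∀ dc, -ρ ≤ dc → dc < ρ + 1 → (|s| = ρ ∨ |dc| = ρ) →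
            (cr + s, cc + dc) ∉ st.2 := by
          intro dc h1 h2 h3 hmem
          rcases hvis _ hmem with hb | hb <;> simp only at hb
          · rcases h3 with h3 | h3 <;> rw [abs_eq hρ] at h3 <;> omega
          · omega
        obtain ⟨d1, d2⟩ := pv_dcfold tiles_x tiles_y cr cc ρ s
          (ρ + 1 - -ρ).toNat (-ρ) (ρ + 1) (by omega) st hvis_dc
        have hvis' : ∀ p ∈ ((PySem.List.pyRange (-ρ) (ρ + 1) 1).foldl (fun st dc =>
            if |s| = ρ ∨ |dc| = ρ then
              if 0 ≤ cr + s ∧ cr + s < tiles_y ∧ 0 ≤ cc + dc ∧ cc + dc < tiles_x ∧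
                 (cr + s, cc + dc) ∉ st.2 then
                (st.1 ++ [[cr + s, cc + dc]], PySem.Set.add st.2 (cr + s, cc + dc))
              else st
            else st) st).2,
            (-ρ < p.1 - cr ∧ p.1 - cr < ρ ∧ -ρ < p.2 - cc ∧ p.2 - cc < ρ) ∨
            (p.1 - cr < s + 1 ∧ -ρ ≤ p.1 - cr ∧ p.1 - cr ≤ ρ ∧ -ρ ≤ p.2 - cc ∧ p.2 - cc ≤ ρ) := by
          intro p hp
          rcases d2 p hp with hp2 | hp2
          · rcases hvis _ hp2 with hb | hb
            · exact Or.inl hb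
            · exact Or.inr ⟨by omega, hb.2.1, hb.2.2.1, hb.2.2.2⟩
          · exact Or.inr ⟨by omega, by omega, by omega, by omega, by omega⟩
        obtain ⟨ih1, ih2⟩ := ih (s + 1) e (by omega) (by omega) he _ hvis'
        refine ⟨?_, ?_⟩
        · rw [ih1, d1, rowA, List.append_assoc]
        · intro p hp
          rcases ih2 p hp with hp2 | hp2
          · rcases d2 p hp2 with hp3 | hp3
            · exact Or.inl hp3
            · exact Or.inr ⟨by omega, by omega, by omega, by omega⟩
          · exact Or.inr ⟨by omega, hp2.2.1, hp2.2.2⟩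

-- A's radius loop, characterised: it appends the pure rings
theorem pv_radfold (tiles_x tiles_y cr cc : Int) :
    ∀ N : Nat, ∀ a m : Int, m - a ≤ N → 1 ≤ a →
    ∀ st : List (List Int) × PySem.Set (Int × Int),
    (∀ p ∈ st.2, -a < p.1 - cr ∧ p.1 - cr < a ∧ -a < p.2 - cc ∧ p.2 - cc < a) →
    ((PySem.List.pyRange a m 1).foldl (fun st radius =>
        (PySem.List.pyRange (-radius) (radius + 1) 1).foldl (fun st dr =>
          (PySem.List.pyRange (-radius) (radius + 1) 1).foldl (fun st dc =>
            if |dr| = radius ∨ |dc| = radius then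
              if 0 ≤ cr + dr ∧ cr + dr < tiles_y ∧ 0 ≤ cc + dc ∧ cc + dc < tiles_x ∧
                 (cr + dr, cc + dc) ∉ st.2 then
                (st.1 ++ [[cr + dr, cc + dc]], PySem.Set.add st.2 (cr + dr, cc + dc))
              else st
            else st) st) st) st).1
      = st.1 ++ (PySem.List.pyRange a m 1).flatMap (ringA tiles_x tiles_y cr cc) := by
  intro N
  induction N with
  | zero =>
      intro a m hN _ st _
      rw [PySem.List.pyRange_one_eq_nil (show m ≤ a by omega)]
      simp
  | succ n ih =>
      intro a m hN ha st hvis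
      by_cases ham : m ≤ a
      · rw [PySem.List.pyRange_one_eq_nil (show m ≤ a from ham)]
        simp
      · rw [PySem.List.pyRange_one_cons (show a < m by omega)]
        simp only [List.foldl_cons, List.flatMap_cons]
        obtain ⟨d1, d2⟩ := pv_drfold tiles_x tiles_y cr cc a (by omega)
          (a + 1 - -a).toNat (-a) (a + 1) (by omega) (by omega) (by omega) st
          (fun p hp => Or.inl (hvis p hp))
        have hvis' : ∀ p ∈ ((PySem.List.pyRange (-a) (a + 1) 1).foldl (fun st dr =>
            (PySem.List.pyRange (-a) (a + 1) 1).foldl (fun st dc =>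
              if |dr| = a ∨ |dc| = a then
                if 0 ≤ cr + dr ∧ cr + dr < tiles_y ∧ 0 ≤ cc + dc ∧ cc + dc < tiles_x ∧
                   (cr + dr, cc + dc) ∉ st.2 then
                  (st.1 ++ [[cr + dr, cc + dc]], PySem.Set.add st.2 (cr + dr, cc + dc))
                else st
              else st) st) st).2,
            -(a + 1) < p.1 - cr ∧ p.1 - cr < a + 1 ∧ -(a + 1) < p.2 - cc ∧ p.2 - cc < a + 1 := by
          intro p hp
          rcases d2 p hp with hp2 | hp2
          · have := hvis p hp2; omega
          · omega
        rw [ih (a + 1) m (by omega) (by omega) _ hvis', d1, ringA, List.append_assoc]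

-- clip an integer-range flatMap whose function vanishes outside [0, n)
theorem pv_clip_flatMap (F : Int → List (List Int)) (a b n : Int)
    (h2 : max a 0 ≤ min (b - 1) (n - 1) + 1)
    (hF : ∀ r, a ≤ r → r < b → (r < 0 ∨ n ≤ r) → F r = []) :
    (PySem.List.pyRange a b 1).flatMap F
      = (PySem.List.pyRange (max a 0) (min (b - 1) (n - 1) + 1) 1).flatMap F := by
  rw [PySem.List.pyRange_one_append a (max a 0) b (le_max_left a 0) (by omega),
      PySem.List.pyRange_one_append (max a 0) (min (b - 1) (n - 1) + 1) b h2 (by omega)]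
  simp only [List.flatMap_append]
  have e1 : (PySem.List.pyRange a (max a 0) 1).flatMap F = [] :=
    List.flatMap_eq_nil_iff.mpr (fun r hr => by
      have := PySem.List.mem_pyRange_one.mp hr
      exact hF r (by omega) (by omega) (by omega))
  have e2 : (PySem.List.pyRange (min (b - 1) (n - 1) + 1) b 1).flatMap F = [] :=
    List.flatMap_eq_nil_iff.mpr (fun r hr => by
      have := PySem.List.mem_pyRange_one.mp hr
      exact hF r (by omega) (by omega) (by omega))
  rw [e1, e2]
  simp

-- one row of A's ring equals B's row
theorem pv_row_eq (tiles_x tiles_y cr cc ρ r : Int) (hρ : 1 ≤ ρ)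
    (hcr : 0 ≤ cr) (hcr2 : cr < tiles_y) (hcc : 0 ≤ cc) (hcc2 : cc < tiles_x)
    (hr1 : max (cr - ρ) 0 ≤ r) (hr2 : r < min (cr + ρ) (tiles_y - 1) + 1) :
    rowA tiles_x tiles_y cr cc ρ (r - cr) = rowB tiles_x cr cc ρ r := by
  unfold rowA rowB
  by_cases hedge : r = cr - ρ ∨ r = cr + ρ
  · rw [if_pos hedge]
    have habs : |r - cr| = ρ := by rw [abs_eq (by omega : (0:Int) ≤ ρ)]; omega
    have hshift := pv_flatMap_shift (s := cc - ρ) (e := cc + ρ + 1) (k := cc)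
        (cellA tiles_x tiles_y cr cc ρ (r - cr))
        (fun c => cellA tiles_x tiles_y cr cc ρ (r - cr) (c - cc))
        (fun c _ _ => rfl)
    rw [show cc - ρ - cc = -ρ by ring, show cc + ρ + 1 - cc = ρ + 1 by ring] at hshift
    rw [← hshift,
        pv_clip_flatMap _ (cc - ρ) (cc + ρ + 1) tiles_x (by omega)
          (fun c h1 h2 h3 => by
            unfold cellA
            rw [if_neg]
            rintro ⟨-, -, -, hc1, hc2⟩
            omega),
        show cc + ρ + 1 - 1 = cc + ρ by ring,
        List.map_eq_flatMap]
    refine List.flatMap_congr (fun c hc => ?_)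
    have hcb := PySem.List.mem_pyRange_one.mp hc
    unfold cellA
    rw [if_pos ⟨Or.inl habs, by omega, by omega, by omega, by omega⟩,
        show cr + (r - cr) = r by ring, show cc + (c - cc) = c by ring]
  · rw [if_neg hedge]
    rw [not_or] at hedge
    have hmid : (PySem.List.pyRange (-ρ + 1) ρ 1).flatMap
        (cellA tiles_x tiles_y cr cc ρ (r - cr)) = [] :=
      List.flatMap_eq_nil_iff.mpr (fun dc hdc => by
        have := PySem.List.mem_pyRange_one.mp hdc
        unfold cellA
        rw [if_neg]
        rintro ⟨hed, -⟩
        rcases hed with hed | hed <;> rw [abs_eq (by omega : (0:Int) ≤ ρ)] at hed <;> omega)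
    rw [PySem.List.pyRange_one_append (-ρ) (-ρ + 1) (ρ + 1) (by omega) (by omega),
        PySem.List.pyRange_one_append (-ρ + 1) ρ (ρ + 1) (by omega) (by omega)]
    simp only [List.flatMap_append]
    rw [show PySem.List.pyRange (-ρ) (-ρ + 1) 1 = [-ρ] by
          rw [PySem.List.pyRange_one_cons (by omega),
              PySem.List.pyRange_one_eq_nil (by omega : -ρ + 1 ≤ -ρ + 1)],
        show PySem.List.pyRange ρ (ρ + 1) 1 = [ρ] by
          rw [PySem.List.pyRange_one_cons (by omega),
              PySem.List.pyRange_one_eq_nil (by omega : ρ + 1 ≤ ρ + 1)],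
        hmid]
    simp only [List.flatMap_cons, List.flatMap_nil, List.append_nil, List.nil_append]
    have h1 : cellA tiles_x tiles_y cr cc ρ (r - cr) (-ρ)
        = (if 0 ≤ cc - ρ then [[r, cc - ρ]] else []) := by
      unfold cellA
      by_cases h : 0 ≤ cc - ρ
      · rw [if_pos ⟨Or.inr (by rw [abs_eq (by omega : (0:Int) ≤ ρ)]; omega),
              by omega, by omega, by omega, by omega⟩, if_pos h,
            show cr + (r - cr) = r by ring, show cc + -ρ = cc - ρ by ring]
      · rw [if_neg (by rintro ⟨-, -, -, hc, -⟩; exact h (by omega)), if_neg h]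
    have h2 : cellA tiles_x tiles_y cr cc ρ (r - cr) ρ
        = (if cc + ρ < tiles_x then [[r, cc + ρ]] else []) := by
      unfold cellA
      by_cases h : cc + ρ < tiles_x
      · rw [if_pos ⟨Or.inr (by rw [abs_eq (by omega : (0:Int) ≤ ρ)]; omega),
              by omega, by omega, by omega, by omega⟩, if_pos h,
            show cr + (r - cr) = r by ring]
      · rw [if_neg (by rintro ⟨-, -, -, -, hc⟩; exact h (by omega)), if_neg h]
    rw [h1, h2]

-- a full ring of A equals B's ring
theorem pv_ring_eq (tiles_x tiles_y cr cc ρ : Int) (hρ : 1 ≤ ρ)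
    (hcr : 0 ≤ cr) (hcr2 : cr < tiles_y) (hcc : 0 ≤ cc) (hcc2 : cc < tiles_x) :
    ringA tiles_x tiles_y cr cc ρ = ringB tiles_x tiles_y cr cc ρ := by
  unfold ringA ringB
  have hshift := pv_flatMap_shift (s := cr - ρ) (e := cr + ρ + 1) (k := cr)
      (rowA tiles_x tiles_y cr cc ρ)
      (fun r => rowA tiles_x tiles_y cr cc ρ (r - cr))
      (fun r _ _ => rfl)
  rw [show cr - ρ - cr = -ρ by ring, show cr + ρ + 1 - cr = ρ + 1 by ring] at hshift
  rw [← hshift,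
      pv_clip_flatMap _ (cr - ρ) (cr + ρ + 1) tiles_y (by omega)
        (fun r h1 h2 h3 => by
          unfold rowA
          refine List.flatMap_eq_nil_iff.mpr (fun dc _ => ?_)
          unfold cellA
          rw [if_neg]
          rintro ⟨-, hb1, hb2, -⟩
          omega),
      show cr + ρ + 1 - 1 = cr + ρ by ring]
  refine List.flatMap_congr (fun r hr => ?_)
  have := PySem.List.mem_pyRange_one.mp hr
  exact pv_row_eq tiles_x tiles_y cr cc ρ r hρ hcr hcr2 hcc hcc2 (by omega) (by omega)

-- A's row-major double loop equals B's comprehension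
theorem pv_rowmajor (tiles_x tiles_y : Int) :
    (PySem.List.pyRange 0 tiles_y 1).foldl (fun tiles row =>
      (PySem.List.pyRange 0 tiles_x 1).foldl (fun tiles col => tiles ++ [[row, col]]) tiles) []
    = (PySem.List.pyRange 0 tiles_y 1).flatMap (fun row =>
      (PySem.List.pyRange 0 tiles_x 1).map (fun col => [row, col])) := by
  have h : (fun (tiles : List (List Int)) (row : Int) =>
      (PySem.List.pyRange 0 tiles_x 1).foldl (fun tiles col => tiles ++ [[row, col]]) tiles)
      = fun tiles row => tiles ++ (PySem.List.pyRange 0 tiles_x 1).map (fun col => [row, col]) := by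
    funext tiles row
    exact PySem.List.foldl_append_singleton_eq_map _ _ _
  rw [h, PySem.List.foldl_append_eq_flatMap, List.nil_append]

-- A's column-major double loop equals B's comprehension
theorem pv_colmajor (tiles_x tiles_y : Int) :
    (PySem.List.pyRange 0 tiles_x 1).foldl (fun tiles col =>
      (PySem.List.pyRange 0 tiles_y 1).foldl (fun tiles row => tiles ++ [[row, col]]) tiles) []
    = (PySem.List.pyRange 0 tiles_x 1).flatMap (fun col =>
      (PySem.List.pyRange 0 tiles_y 1).map (fun row => [row, col])) := by
  have h : (fun (tiles : List (List Int)) (col : Int) =>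
      (PySem.List.pyRange 0 tiles_y 1).foldl (fun tiles row => tiles ++ [[row, col]]) tiles)
      = fun tiles col => tiles ++ (PySem.List.pyRange 0 tiles_y 1).map (fun row => [row, col]) := by
    funext tiles col
    exact PySem.List.foldl_append_singleton_eq_map _ _ _
  rw [h, PySem.List.foldl_append_eq_flatMap, List.nil_append]

-- the whole center_outward branch, A's form = B's form, for a nonempty grid
theorem pv_center (tiles_x tiles_y cr cc : Int)
    (hcr : 0 ≤ cr) (hcr2 : cr < tiles_y) (hcc : 0 ≤ cc) (hcc2 : cc < tiles_x) :
    ((PySem.List.pyRange 1 (max tiles_x tiles_y) 1).foldl (fun st radius =>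
        (PySem.List.pyRange (-radius) (radius + 1) 1).foldl (fun st dr =>
          (PySem.List.pyRange (-radius) (radius + 1) 1).foldl (fun st dc =>
            if |dr| = radius ∨ |dc| = radius then
              if 0 ≤ cr + dr ∧ cr + dr < tiles_y ∧ 0 ≤ cc + dc ∧ cc + dc < tiles_x ∧
                 (cr + dr, cc + dc) ∉ st.2 then
                (st.1 ++ [[cr + dr, cc + dc]], PySem.Set.add st.2 (cr + dr, cc + dc))
              else st
            else st) st) st)
        ([[cr, cc]], PySem.Set.add PySem.Set.empty (cr, cc))).1
    = (PySem.List.pyRange 1 (max tiles_x tiles_y) 1).foldl (fun tiles radius =>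
        (PySem.List.pyRange (max (cr - radius) 0) (min (cr + radius) (tiles_y - 1) + 1) 1).foldl
          (fun tiles r =>
            if r = cr - radius ∨ r = cr + radius then
              tiles ++ (PySem.List.pyRange (max (cc - radius) 0) (min (cc + radius) (tiles_x - 1) + 1) 1).map
                (fun c => [r, c])
            else
              tiles ++ (if 0 ≤ cc - radius then [[r, cc - radius]] else [])
                    ++ (if cc + radius < tiles_x then [[r, cc + radius]] else []))
          tiles)
        (if 0 ≤ cr ∧ cr < tiles_y ∧ 0 ≤ cc ∧ cc < tiles_x then [[cr, cc]] else []) := by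
  rw [if_pos ⟨hcr, hcr2, hcc, hcc2⟩]
  rw [pv_radfold tiles_x tiles_y cr cc (max tiles_x tiles_y - 1).toNat 1 (max tiles_x tiles_y)
        (by omega) le_rfl ([[cr, cc]], PySem.Set.add PySem.Set.empty (cr, cc))
        (by
          intro p hp
          rw [PySem.Set.mem_add] at hp
          rcases hp with hp | hp
          · simp [PySem.Set.empty] at hp
          · subst hp; simp)]
  have hB : (fun (tiles : List (List Int)) (radius : Int) =>
      (PySem.List.pyRange (max (cr - radius) 0) (min (cr + radius) (tiles_y - 1) + 1) 1).foldl
        (fun tiles r =>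
          if r = cr - radius ∨ r = cr + radius then
            tiles ++ (PySem.List.pyRange (max (cc - radius) 0) (min (cc + radius) (tiles_x - 1) + 1) 1).map
              (fun c => [r, c])
          else
            tiles ++ (if 0 ≤ cc - radius then [[r, cc - radius]] else [])
                  ++ (if cc + radius < tiles_x then [[r, cc + radius]] else []))
        tiles)
      = fun tiles radius => tiles ++ ringB tiles_x tiles_y cr cc radius := by
    funext tiles radius
    have hrow : (fun (tiles : List (List Int)) (r : Int) =>
        if r = cr - radius ∨ r = cr + radius then
          tiles ++ (PySem.List.pyRange (max (cc - radius) 0) (min (cc + radius) (tiles_x - 1) + 1) 1).map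
            (fun c => [r, c])
        else
          tiles ++ (if 0 ≤ cc - radius then [[r, cc - radius]] else [])
                ++ (if cc + radius < tiles_x then [[r, cc + radius]] else []))
        = fun tiles r => tiles ++ rowB tiles_x cr cc radius r := by
      funext t r
      unfold rowB
      split_ifs <;> simp [List.append_assoc]
    rw [hrow, PySem.List.foldl_append_eq_flatMap]
    rfl
  rw [hB, PySem.List.foldl_append_eq_flatMap]
  refine congrArg _ (List.flatMap_congr (fun radius hradius => ?_))
  have := PySem.List.mem_pyRange_one.mp hradius
  exact pv_ring_eq tiles_x tiles_y cr cc radius (by omega) hcr hcr2 hcc hcc2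

-- ===== VERDICT (by name: the statement is the Claim_ definition above) =====
theorem generate_progressive_tile_order_spec : Claim_unchanged_generate_progressive_tile_order := by
  intro tiles_x tiles_y pattern _
  unfold Spec_generate_progressive_tile_order
  intro hD
  unfold generate_progressive_tile_order generate_progressive_tile_order_alt
  by_cases h1 : pattern = "left_to_right"
  · rw [if_pos h1, if_pos h1]
    exact pv_colmajor tiles_x tiles_y
  · rw [if_neg h1, if_neg h1]
    by_cases h2 : pattern = "top_to_bottom"
    · have h3 : pattern ≠ "center_outward" := by subst h2; decide
      rw [if_pos h2, if_neg h3]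
      exact pv_rowmajor tiles_x tiles_y
    · rw [if_neg h2]
      by_cases h3 : pattern = "center_outward"
      · rw [if_pos h3, if_pos h3]
        have hxy : 1 ≤ tiles_x ∧ 1 ≤ tiles_y := by
          unfold D_generate_progressive_tile_order at hD
          rw [not_and_or] at hD
          rcases hD with hD | hD
          · exact absurd h3 hD
          · omega
        have hcx : PySem.Int.floordiv tiles_x 2 = tiles_x / 2 :=
          PySem.Int.floordiv_eq_ediv_of_pos (by norm_num)
        have hcy : PySem.Int.floordiv tiles_y 2 = tiles_y / 2 :=
          PySem.Int.floordiv_eq_ediv_of_pos (by norm_num)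
        simp only []
        exact pv_center tiles_x tiles_y (PySem.Int.floordiv tiles_y 2) (PySem.Int.floordiv tiles_x 2)
          (by omega) (by omega) (by omega) (by omega)
      · rw [if_neg h3, if_neg h3]
        exact pv_rowmajor tiles_x tiles_y
theorem generate_progressive_tile_order_changed : Claim_changed_generate_progressive_tile_order := by
  unfold Claim_changed_generate_progressive_tile_order; decide
theorem generate_progressive_tile_order_tight : Claim_exact_generate_progressive_tile_order := by
  intro tiles_x tiles_y pattern _ hD
  obtain ⟨hpat, hxy⟩ := hD
  subst hpat
  unfold generate_progressive_tile_order generate_progressive_tile_order_alt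
  rw [if_neg (by decide), if_neg (by decide), if_pos rfl, if_neg (by decide), if_pos rfl]
  simp only []
  have hcx : PySem.Int.floordiv tiles_x 2 = tiles_x / 2 :=
    PySem.Int.floordiv_eq_ediv_of_pos (by norm_num)
  have hA : ((PySem.List.pyRange 1 (max tiles_x tiles_y) 1).foldl (fun st radius =>
      (PySem.List.pyRange (-radius) (radius + 1) 1).foldl (fun st dr =>
        (PySem.List.pyRange (-radius) (radius + 1) 1).foldl (fun st dc =>
          if |dr| = radius ∨ |dc| = radius then
            if 0 ≤ PySem.Int.floordiv tiles_y 2 + dr ∧ PySem.Int.floordiv tiles_y 2 + dr < tiles_y ∧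
               0 ≤ PySem.Int.floordiv tiles_x 2 + dc ∧ PySem.Int.floordiv tiles_x 2 + dc < tiles_x ∧
               (PySem.Int.floordiv tiles_y 2 + dr, PySem.Int.floordiv tiles_x 2 + dc) ∉ st.2 then
              (st.1 ++ [[PySem.Int.floordiv tiles_y 2 + dr, PySem.Int.floordiv tiles_x 2 + dc]],
               PySem.Set.add st.2 (PySem.Int.floordiv tiles_y 2 + dr, PySem.Int.floordiv tiles_x 2 + dc))
            else st
          else st) st) st)
      ([[PySem.Int.floordiv tiles_y 2, PySem.Int.floordiv tiles_x 2]],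
       PySem.Set.add PySem.Set.empty (PySem.Int.floordiv tiles_y 2, PySem.Int.floordiv tiles_x 2))) =
      ([[PySem.Int.floordiv tiles_y 2, PySem.Int.floordiv tiles_x 2]],
       PySem.Set.add PySem.Set.empty (PySem.Int.floordiv tiles_y 2, PySem.Int.floordiv tiles_x 2)) := by
    apply pv_foldl_id
    intro stA radius _
    apply pv_foldl_id
    intro stB dr _
    apply pv_foldl_id
    intro stC dc _
    split_ifs with he hb
    · exfalso
      rcases hxy with h | h <;> omega
    · rfl
    · rfl
  have hB0 : ¬ (0 ≤ PySem.Int.floordiv tiles_y 2 ∧ PySem.Int.floordiv tiles_y 2 < tiles_y ∧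
      0 ≤ PySem.Int.floordiv tiles_x 2 ∧ PySem.Int.floordiv tiles_x 2 < tiles_x) := by
    rintro ⟨hb1, hb2, hb3, hb4⟩
    rcases hxy with h | h <;> omega
  rw [hA, if_neg hB0]
  have hB : (PySem.List.pyRange 1 (max tiles_x tiles_y) 1).foldl (fun tiles radius =>
      (PySem.List.pyRange (max (PySem.Int.floordiv tiles_y 2 - radius) 0)
        (min (PySem.Int.floordiv tiles_y 2 + radius) (tiles_y - 1) + 1) 1).foldl
        (fun tiles r =>
          if r = PySem.Int.floordiv tiles_y 2 - radius ∨ r = PySem.Int.floordiv tiles_y 2 + radius then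
            tiles ++ (PySem.List.pyRange (max (PySem.Int.floordiv tiles_x 2 - radius) 0)
              (min (PySem.Int.floordiv tiles_x 2 + radius) (tiles_x - 1) + 1) 1).map
              (fun c => [r, c])
          else
            tiles ++ (if 0 ≤ PySem.Int.floordiv tiles_x 2 - radius then [[r, PySem.Int.floordiv tiles_x 2 - radius]] else [])
                  ++ (if PySem.Int.floordiv tiles_x 2 + radius < tiles_x then [[r, PySem.Int.floordiv tiles_x 2 + radius]] else []))
        tiles) ([] : List (List Int)) = [] := by
    apply pv_foldl_id
    intro tiles radius hradius
    have hrad := PySem.List.mem_pyRange_one.mp hradius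
    apply pv_foldl_id
    intro tilesP r hr
    have hrb := PySem.List.mem_pyRange_one.mp hr
    rcases hxy with h | h
    · split_ifs with he hc1 hc2 hc2
      · rw [PySem.List.pyRange_one_eq_nil (by omega), List.map_nil, List.append_nil]
      · exfalso; omega
      · exfalso; omega
      · exfalso; omega
      · rw [List.append_nil, List.append_nil]
    · exfalso; omega
  rw [hB]
  simp
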